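-- pv_equiv track=rewrite | github.com/aHungryCarl/carlBot | scrape.py | mealTimes
-- ===== SOURCE A (Python) =====
-- def mealTimes(menu):
--     breakfastList = []
--     brunchList = []
--     lunchList = []
--     dinnerList = []
--     allTimes = []
--     brunch = False
--     lunch = False
--
--     for i in range(0, len(menu)):
--         if 'Breakfast' in menu[i][1]:
--             breakfastList.append(menu[i])
--         if 'Brunch' in menu[i][1]:
--             brunchList.append(menu[i])
--             brunch = True
--         if 'Lunch' in menu[i][1]:
--             lunchList.append(menu[i])
--             lunch = True
--         if 'Soup' in menu[i][1]:
--             if brunch == True: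
--                 brunchList.append(menu[i])
--             if lunch == True:
--                 lunchList.append(menu[i])
--             dinnerList.append(menu[i])
--         if 'Cucina Pizza' in menu[i][1] or 'Cucina Pasta' in menu[i][1] or 'Thymes' in menu[i][1]:
--             if brunch == True:
--                 brunchList.append(menu[i])
--             if lunch == True:
--                 lunchList.append(menu[i])
--             dinnerList.append(menu[i])
--         if 'Grill' in menu[i][1] and 'Breakfast' not in menu[i][1]:
--             if brunch == True:
--                 brunchList.append(menu[i])
--             if lunch == True:
--                 lunchList.append(menu[i])
--             dinnerList.append(menu[i])
--         if 'Global' in menu[i][1] or 'American' in menu[i][1] or 'Chopsticks' in menu[i][1]: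
--             if lunch == True:
--                 lunchList.append(menu[i])
--             dinnerList.append(menu[i])
--         if 'Dinner' in menu[i][1]:
--             dinnerList.append(menu[i])
--         if 'Cucina' in menu[i][1] and 'Pasta' not in menu[i][1] and 'Pizza' not in menu[i][1] and 'Brunch' not in menu[i][1]:
--             dinnerList.append(menu[i])
--
--     allTimes.append(breakfastList)
--     allTimes.append(brunchList)
--     allTimes.append(lunchList)
--     allTimes.append(dinnerList)
--
--     return allTimes
-- ===== SOURCE B (Python) =====
-- def mealTimes(menu):
--     # Count, per row, how many copies of that row each bucket receives, then
--     # build each bucket by replicating rows according to its count column.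
--     counts = []
--     b = False
--     l = False
--     for row in menu:
--         s = row[1]
--         b = 'Brunch' in s or b
--         l = 'Lunch' in s or l
--         c1 = 'Soup' in s
--         c2 = 'Cucina Pizza' in s or 'Cucina Pasta' in s or 'Thymes' in s
--         c3 = 'Grill' in s and 'Breakfast' not in s
--         c4 = 'Global' in s or 'American' in s or 'Chopsticks' in s
--         d = int(c1) + int(c2) + int(c3)
--         counts.append((
--             int('Breakfast' in s),
--             int('Brunch' in s) + (d if b else 0),
--             int('Lunch' in s) + (d + int(c4) if l else 0),
--             d + int(c4) + int('Dinner' in s)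
--               + int('Cucina' in s and 'Pasta' not in s
--                     and 'Pizza' not in s and 'Brunch' not in s),
--         ))
--     return [[row for row, c in zip(menu, counts) for _ in range(c[k])]
--             for k in range(4)]
-- ===== Notes on version B (the rewrite author's own statement) =====
-- stated objective: alternative
-- what changed: Replaces A's single pass of conditional appends interleaved across four mutable lists by a multiplicity scheme: one pass computes, per row, an integer count of how many copies each bucket receives (folding the sticky brunch/lunch flags into the counts), and each bucket is then built separately by replicating rows according to its count column.
import Mathlib
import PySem

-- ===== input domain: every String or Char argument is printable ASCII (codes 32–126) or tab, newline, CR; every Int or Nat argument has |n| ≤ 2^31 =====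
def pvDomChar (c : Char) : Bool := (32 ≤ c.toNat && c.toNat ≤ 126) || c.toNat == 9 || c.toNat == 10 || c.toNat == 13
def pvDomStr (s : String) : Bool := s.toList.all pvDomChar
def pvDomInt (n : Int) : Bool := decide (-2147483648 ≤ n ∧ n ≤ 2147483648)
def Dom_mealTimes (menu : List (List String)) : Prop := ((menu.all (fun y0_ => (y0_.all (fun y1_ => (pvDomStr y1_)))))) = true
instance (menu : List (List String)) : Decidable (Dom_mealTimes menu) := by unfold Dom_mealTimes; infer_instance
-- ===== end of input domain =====

-- B replaces A's single pass of conditional appends with sticky flags by a multiplicity scheme: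
-- one pass computes, per row, how many copies each bucket receives; each bucket is then built by
-- replicating rows by its count column; objective: alternative decomposition (same O(n) cost).


-- ===== PORT A =====
-- 'pat in s' (Python substring test); shared by both ports
def hasSub (s pat : String) : Bool := PySem.Str.isIn pat s

-- one iteration of A's loop; state = (breakfastList, brunchList, lunchList, dinnerList, brunch, lunch)
def stepA (st : List (List String) × List (List String) × List (List String) × List (List String) × Bool × Bool)
    (row : List String) :
    List (List String) × List (List String) × List (List String) × List (List String) × Bool × Bool :=
  let s := (PySem.List.pyGet? row 1).getD ""   -- menu[i][1]; Pre_ guarantees the index is in range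
  match st with
  | (bk, br, lu, di, b, l) =>
    let bk := if hasSub s "Breakfast" then bk ++ [row] else bk
    let br := if hasSub s "Brunch" then br ++ [row] else br
    let b := if hasSub s "Brunch" then true else b
    let lu := if hasSub s "Lunch" then lu ++ [row] else lu
    let l := if hasSub s "Lunch" then true else l
    let br := if hasSub s "Soup" then (if b then br ++ [row] else br) else br
    let lu := if hasSub s "Soup" then (if l then lu ++ [row] else lu) else lu
    let di := if hasSub s "Soup" then di ++ [row] else di
    let c2 := hasSub s "Cucina Pizza" || hasSub s "Cucina Pasta" || hasSub s "Thymes"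
    let br := if c2 then (if b then br ++ [row] else br) else br
    let lu := if c2 then (if l then lu ++ [row] else lu) else lu
    let di := if c2 then di ++ [row] else di
    let c3 := hasSub s "Grill" && !hasSub s "Breakfast"
    let br := if c3 then (if b then br ++ [row] else br) else br
    let lu := if c3 then (if l then lu ++ [row] else lu) else lu
    let di := if c3 then di ++ [row] else di
    let c4 := hasSub s "Global" || hasSub s "American" || hasSub s "Chopsticks"
    let lu := if c4 then (if l then lu ++ [row] else lu) else lu
    let di := if c4 then di ++ [row] else di
    let di := if hasSub s "Dinner" then di ++ [row] else di
    let c6 := hasSub s "Cucina" && !hasSub s "Pasta" && !hasSub s "Pizza" && !hasSub s "Brunch"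
    let di := if c6 then di ++ [row] else di
    (bk, br, lu, di, b, l)

def mealTimes (menu : List (List String)) : List (List (List String)) :=
  let st := menu.foldl stepA ([], [], [], [], false, false)
  [st.1, st.2.1, st.2.2.1, st.2.2.2.1]

-- ===== PORT B =====
-- int(c) on a Python bool
def bnum (c : Bool) : Nat := if c then 1 else 0

-- the four per-row multiplicities Source B appends to `counts` (b, l already updated for this row)
def rowCounts (s : String) (b l : Bool) : Nat × Nat × Nat × Nat :=
  let c1 := hasSub s "Soup"
  let c2 := hasSub s "Cucina Pizza" || hasSub s "Cucina Pasta" || hasSub s "Thymes"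
  let c3 := hasSub s "Grill" && !hasSub s "Breakfast"
  let c4 := hasSub s "Global" || hasSub s "American" || hasSub s "Chopsticks"
  let d := bnum c1 + bnum c2 + bnum c3
  (bnum (hasSub s "Breakfast"),
   bnum (hasSub s "Brunch") + (if b then d else 0),
   bnum (hasSub s "Lunch") + (if l then d + bnum c4 else 0),
   d + bnum c4 + bnum (hasSub s "Dinner")
     + bnum (hasSub s "Cucina" && !hasSub s "Pasta" && !hasSub s "Pizza" && !hasSub s "Brunch"))

-- Source B's counting loop, threading the sticky flags
def countsPass : List (List String) → Bool → Bool → List (Nat × Nat × Nat × Nat)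
  | [], _, _ => []
  | row :: rest, b, l =>
    let s := (PySem.List.pyGet? row 1).getD ""
    let b := hasSub s "Brunch" || b
    let l := hasSub s "Lunch" || l
    rowCounts s b l :: countsPass rest b l

-- '[row for row, c in zip(menu, counts) for _ in range(pick c)]'
def bucket (menu : List (List String)) (counts : List (Nat × Nat × Nat × Nat))
    (pick : Nat × Nat × Nat × Nat → Nat) : List (List String) :=
  (menu.zip counts).flatMap (fun t => List.replicate (pick t.2) t.1)

def mealTimes_alt (menu : List (List String)) : List (List (List String)) :=
  let counts := countsPass menu false false
  [bucket menu counts (fun c => c.1),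
   bucket menu counts (fun c => c.2.1),
   bucket menu counts (fun c => c.2.2.1),
   bucket menu counts (fun c => c.2.2.2)]

-- ===== PRECONDITION & SPEC =====
-- Pre_ excludes exactly the inputs where Python A raises: a row with fewer than 2 entries makes
-- menu[i][1] an IndexError (B raises there too).
def Pre_mealTimes (menu : List (List String)) : Prop := ∀ row ∈ menu, 2 ≤ row.length
instance (menu : List (List String)) : Decidable (Pre_mealTimes menu) := by unfold Pre_mealTimes; infer_instance
def pvWitness_mealTimes : List (List String) := [["Egg", "Breakfast Grill"], ["Pho", "Soup Lunch"]]

def Spec_mealTimes (menu : List (List String)) (out : List (List (List String))) : Prop := out = mealTimes_alt menu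
instance (menu : List (List String)) (out : List (List (List String))) : Decidable (Spec_mealTimes menu out) := by unfold Spec_mealTimes; infer_instance

-- ===== CLAIM (what is proved, stated in full; the proofs are below) =====
def Claim_equal_mealTimes : Prop := ∀ (menu : List (List String)), Dom_mealTimes menu → Pre_mealTimes menu → Spec_mealTimes menu (mealTimes menu)

-- ===== LEMMAS AND PROOFS =====

-- (if c then xs.append(row) else xs) appends a 0/1-replicate segment
lemma condApp_eq (c : Prop) [Decidable c] (xs : List (List String)) (row : List String) :
    (if c then xs ++ [row] else xs) = xs ++ List.replicate (if c then 1 else 0) row := by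
  split <;> simp

-- one step of A appends exactly the row multiplicities of B (with the updated flags)
lemma step_eq (row : List String) (bk br lu di : List (List String)) (b l : Bool) :
    stepA (bk, br, lu, di, b, l) row =
      (let s := (PySem.List.pyGet? row 1).getD ""
       let b' := hasSub s "Brunch" || b
       let l' := hasSub s "Lunch" || l
       let c := rowCounts s b' l'
       (bk ++ List.replicate c.1 row, br ++ List.replicate c.2.1 row,
        lu ++ List.replicate c.2.2.1 row, di ++ List.replicate c.2.2.2 row, b', l')) := by
  cases hb : hasSub ((PySem.List.pyGet? row 1).getD "") "Brunch" || b <;>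
  cases hl : hasSub ((PySem.List.pyGet? row 1).getD "") "Lunch" || l <;>
    (simp [-List.append_assoc, stepA, rowCounts, bnum, hb, hl, condApp_eq];
     simp [List.append_assoc, Nat.add_assoc])

lemma loop_eq : ∀ (menu : List (List String)) (b l : Bool) (bk br lu di : List (List String)),
    (let st := menu.foldl stepA (bk, br, lu, di, b, l)
     (st.1, st.2.1, st.2.2.1, st.2.2.2.1)) =
    (let counts := countsPass menu b l
     (bk ++ bucket menu counts (fun c => c.1),
      br ++ bucket menu counts (fun c => c.2.1),
      lu ++ bucket menu counts (fun c => c.2.2.1),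
      di ++ bucket menu counts (fun c => c.2.2.2))) := by
  intro menu
  induction menu with
  | nil => intro b l bk br lu di; simp [bucket]
  | cons row rest ih =>
    intro b l bk br lu di
    simp only [List.foldl_cons, step_eq, countsPass]
    rw [ih]
    simp [bucket, List.append_assoc]

-- ===== VERDICT (by name: the statement is the Claim_ definition above) =====
theorem mealTimes_spec : Claim_equal_mealTimes := by
  intro menu _ _
  unfold Spec_mealTimes mealTimes mealTimes_alt
  have h := loop_eq menu false false [] [] [] []
  simp only at h
  simp only [Prod.mk.injEq] at h
  dsimp only
  rw [h.1, h.2.1, h.2.2.1, h.2.2.2]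
  simp
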